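-- pv_equiv track=rewrite | github.com/lucianTrepteanu/Artificial-Intelligence | Blocks_problem/block_problem.py | compute_heuristic_count
-- ===== SOURCE A (Python) =====
-- def good_stack(stack):
--     temp_dict={}
--     if len(stack)<1: #daca stiva nu are cel putin 2 elemente
--         return True
--
--     string1=stack[0] #facem un dictionar cu aparitiile literelor in primul cuvant (frecvente)
--     for i in range(len(string1)):
--         ch=string1[i]
--         if ch in temp_dict:
--             temp_dict[ch]=temp_dict[ch]+1
--         else:
--             temp_dict[ch]=1
--
--     for string in stack[1:]: #pentru celelalte cuvinte facem un dictionar cu frecventele literelor si compara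
--         new_dict={}
--         for i in range(len(string)):
--             ch=string[i]
--             if ch in new_dict:
--                 new_dict[ch]=new_dict[ch]+1
--             else:
--                 new_dict[ch]=1
--
--         if temp_dict != new_dict: #daca are alt multiset de litere nu e anagrama si stiva nu poate face parte din stare finala
--             return False
--
--     return True
--
-- def compute_heuristic_count(state):
--     result=0
--     for stack in state:
--         for i in range(len(stack)-1):
--             test=[]
--             test.append(stack[i])
--             test.append(stack[i+1])
--             if good_stack(test)==True:
--                 break
--             result+=1
--
--     return result
-- ===== SOURCE B (Python) =====
-- def first_anagram_position(stack):
--     # position of the first adjacent anagram pair; = number of pairs before it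
--     keys = [sorted(word) for word in stack]
--     matches = [x == y for x, y in zip(keys, keys[1:])]
--     return matches.index(True) if True in matches else len(matches)
--
-- def compute_heuristic_count(state):
--     return sum(first_anagram_position(stack) for stack in state)
-- ===== Notes on version B (the rewrite author's own statement) =====
-- stated objective: alternative
-- what changed: B replaces A's incremental scan-with-break over per-pair frequency dictionaries by a staged computation: it materialises the full boolean vector of adjacent sorted-key equalities for each stack (no early exit) and returns the index of the first True (default = number of pairs), summing these positions over the stacks.
import Mathlib
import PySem

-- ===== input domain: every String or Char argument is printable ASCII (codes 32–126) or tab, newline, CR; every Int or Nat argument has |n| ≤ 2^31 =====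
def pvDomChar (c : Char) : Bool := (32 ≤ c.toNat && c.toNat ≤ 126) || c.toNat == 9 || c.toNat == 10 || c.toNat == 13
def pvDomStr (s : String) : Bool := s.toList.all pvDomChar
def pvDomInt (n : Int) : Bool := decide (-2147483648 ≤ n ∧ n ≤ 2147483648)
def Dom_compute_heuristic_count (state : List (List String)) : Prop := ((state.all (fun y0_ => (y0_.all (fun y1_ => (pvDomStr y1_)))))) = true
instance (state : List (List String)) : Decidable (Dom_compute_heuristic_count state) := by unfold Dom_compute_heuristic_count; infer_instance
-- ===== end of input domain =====

-- B replaces A's scan-with-break over per-pair frequency dictionaries by a staged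
-- computation: the full boolean vector of adjacent sorted-key equalities, then the
-- index of its first True (default = number of pairs), summed over stacks.

-- ===== PORT A =====
-- A's letter-frequency loop: if ch in dict then +1 else set to 1
def pvFreq (s : List Char) : PySem.Dict Char Int :=
  s.foldl (fun d ch => if d.contains ch then d.insert ch (d.getD ch 0 + 1) else d.insert ch 1)
    PySem.Dict.empty

-- Python's `==` on dicts (order-insensitive): same key sets, same values
def pvDictEq (d1 d2 : PySem.Dict Char Int) : Bool :=
  d1.keys.all (fun k => d2.contains k && (d2.getD k 0 == d1.getD k 0)) &&
  d2.keys.all (fun k => d1.contains k && (d1.getD k 0 == d2.getD k 0))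

-- the `for string in stack[1:]` loop with its early `return False`
def pvGoodLoop (temp : PySem.Dict Char Int) : List String → Bool
  | [] => true
  | s :: rest =>
    let new_dict := pvFreq s.toList
    if pvDictEq temp new_dict then pvGoodLoop temp rest else false

def good_stack (stack : List String) : Bool :=
  if stack.length < 1 then true
  else
    match stack with
    | [] => true
    | s0 :: rest => pvGoodLoop (pvFreq s0.toList) rest

-- inner `for i in range(len(stack)-1)` loop with break, over adjacent pairs
def pvLoopA : List String → Int
  | a :: b :: rest =>
    let test := [a, b]
    if good_stack test = true then 0 else 1 + pvLoopA (b :: rest)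
  | _ => 0

def compute_heuristic_count (state : List (List String)) : Int :=
  state.foldl (fun result stack => result + pvLoopA stack) 0

-- ===== PORT B =====
-- sorted(word)
def pvKey (w : String) : List Char := PySem.List.sorted w.toList (fun c => c) false

-- first_anagram_position: full vector of adjacent-key equalities, then index of first True
def first_anagram_position (stack : List String) : Int :=
  let keys := stack.map pvKey
  let pairsEq := (keys.zip keys.tail).map (fun p => p.1 == p.2)
  if pairsEq.contains true then (((PySem.List.index? pairsEq true).getD 0 : Nat) : Int)
  else (pairsEq.length : Int)

def compute_heuristic_count_alt (state : List (List String)) : Int :=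
  (state.map first_anagram_position).sum

-- ===== PRECONDITION & SPEC =====
def Spec_compute_heuristic_count (state : List (List String)) (out : Int) : Prop := out = compute_heuristic_count_alt state
instance (state : List (List String)) (out : Int) : Decidable (Spec_compute_heuristic_count state out) := by unfold Spec_compute_heuristic_count; infer_instance

-- ===== CLAIM (what is proved, stated in full; the proofs are below) =====
def Claim_equal_compute_heuristic_count : Prop := ∀ (state : List (List String)), Dom_compute_heuristic_count state → Spec_compute_heuristic_count state (compute_heuristic_count state)

-- ===== LEMMAS AND PROOFS =====

theorem pvFreq_eq_counter (s : List Char) : pvFreq s = PySem.Dict.counter s := by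
  unfold pvFreq
  rw [show (fun (d : PySem.Dict Char Int) ch =>
        if d.contains ch then d.insert ch (d.getD ch 0 + 1) else d.insert ch 1) =
      (fun (d : PySem.Dict Char Int) ch => d.insert ch (d.getD ch 0 + 1)) from ?_]
  · exact PySem.Dict.foldl_insert_getD_add_one_eq_counter s
  · funext d ch
    by_cases h : d.contains ch
    · simp [h]
    · have h' : d.contains ch = false := by simpa using h
      simp [h', PySem.Dict.getD_of_not_contains]

theorem pvDictEq_counter_iff (a b : List Char) :
    pvDictEq (PySem.Dict.counter a) (PySem.Dict.counter b) = true ↔ ∀ c, a.count c = b.count c := by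
  unfold pvDictEq
  simp only [Bool.and_eq_true, List.all_eq_true, PySem.Dict.keys_counter,
    PySem.Dict.getD_counter, PySem.Dict.contains_counter, PySem.Set.mem_ofList, beq_iff_eq]
  constructor
  · rintro ⟨h1, h2⟩ c
    by_cases ha : c ∈ a
    · exact_mod_cast ((h1 c ha).2).symm
    · by_cases hb : c ∈ b
      · exact_mod_cast (h2 c hb).2
      · simp [List.count_eq_zero_of_not_mem ha, List.count_eq_zero_of_not_mem hb]
  · intro h
    constructor
    · intro c hc
      refine ⟨?_, by exact_mod_cast (h c).symm⟩
      have : 0 < a.count c := List.count_pos_iff.mpr hc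
      rw [h c] at this
      simpa using List.count_pos_iff.mp this
    · intro c hc
      refine ⟨?_, by exact_mod_cast h c⟩
      have : 0 < b.count c := List.count_pos_iff.mpr hc
      rw [← h c] at this
      simpa using List.count_pos_iff.mp this

theorem good_stack_pair (a b : String) :
    good_stack [a, b] = true ↔ pvKey a = pvKey b := by
  have : good_stack [a, b] = pvDictEq (pvFreq a.toList) (pvFreq b.toList) := by
    unfold good_stack pvGoodLoop
    by_cases h : pvDictEq (pvFreq a.toList) (pvFreq b.toList) <;> simp [pvGoodLoop, h]
  rw [this, pvFreq_eq_counter, pvFreq_eq_counter, pvDictEq_counter_iff,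
    ← List.perm_iff_count]
  unfold pvKey
  rw [PySem.List.sorted_id_eq_sorted_id_iff_perm]

theorem pvLoopA_eq (stack : List String) : pvLoopA stack = first_anagram_position stack := by
  match stack with
  | [] => rfl
  | [a] => rfl
  | a :: b :: rest =>
    have hmat : ((((a :: b :: rest).map pvKey).zip ((a :: b :: rest).map pvKey).tail).map
        (fun p => p.1 == p.2)) =
        (pvKey a == pvKey b) ::
          ((((b :: rest).map pvKey).zip ((b :: rest).map pvKey).tail).map (fun p => p.1 == p.2)) := by
      simp
    by_cases h : pvKey a = pvKey b
    · have hg : good_stack [a, b] = true := (good_stack_pair a b).mpr h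
      unfold pvLoopA first_anagram_position
      simp [h, hg]
    · have hg : good_stack [a, b] ≠ true := fun hc => h ((good_stack_pair a b).mp hc)
      have ih := pvLoopA_eq (b :: rest)
      unfold pvLoopA
      rw [if_neg hg, ih]
      unfold first_anagram_position
      simp only [hmat]
      have hne : (pvKey a == pvKey b) ≠ true := by simpa using h
      rw [PySem.List.index?_cons_of_ne _ hne]
      set m := ((((b :: rest).map pvKey).zip ((b :: rest).map pvKey).tail).map (fun p => p.1 == p.2)) with hm
      by_cases hc : m.contains true
      · have hmem : true ∈ m := by simpa using hc
        cases h' : List.idxOf? true m with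
        | none => exact absurd hmem (by simpa using List.idxOf?_eq_none_iff.mp h')
        | some k =>
          simp [hmem, h', h]
          ring
      · have hnm : ¬ true ∈ m := by simpa using hc
        simp [hnm, h]
        ring

-- ===== VERDICT (by name: the statement is the Claim_ definition above) =====
theorem compute_heuristic_count_spec : Claim_equal_compute_heuristic_count := by
  intro state _
  unfold Spec_compute_heuristic_count compute_heuristic_count compute_heuristic_count_alt
  rw [PySem.List.foldl_add, funext pvLoopA_eq, zero_add]
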